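-- pv_equiv track=rewrite | github.com/pcdinh/sv | revopy/ds/postgresql.py | pyformat_in_list_to_native
-- ===== SOURCE A (Python) =====
-- from typing import Dict, List, Tuple, Union
--
-- def pyformat_in_list_to_native(query: str, params: List[Dict]) -> Tuple[str, List[List]]:
--     """Rewrite SQL query formatted in pyformat to PostgreSQL native format
--     E.x: INSERT INTO users (user_id, first_name) VALUES (%(user_id)s, %(first_name)s)
--          [
--            {'user_id': 1, 'first_name': 'A1'}, {'user_id': 2, 'first_name': 'A2'}
--          ]
--          will be converted to
--          INSERT INTO users (user_id, first_name) VALUES ($1, $2)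
--          [
--            (1, 'A1'), (2, 'A2')
--          ]
--     :param str query:
--     :param list params:
--             A list of mapping between field name and its value. E.x: [{"user_id": 1, "status": 3, "country": "US"}]
--     :return: a tuple (str, list[dict])
--     """
--     field_values = []
--     counter = 1
--     new_query = query
--     data = params[:]  # copy it to avoid pass-by-reference
--     first_data_item = data.pop(0)
--     field_value_per_set = []
--     for field_name, value in first_data_item.items():
--         new_query = new_query.replace("".join(["%(", field_name, ")s"]), "$%s" % counter)
--         field_value_per_set.append(value)
--         counter += 1
--     field_values.append(field_value_per_set)
--     for item in data:
--         field_value_per_set = []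
--         for field_name, value in item.items():
--             field_value_per_set.append(value)
--         field_values.append(field_value_per_set)
--     return new_query, field_values
-- ===== SOURCE B (Python) =====
-- def pyformat_in_list_to_native(query, params):
--     placeholder = {k: "$%d" % i for i, k in enumerate(params[0], 1)}
--     out = []
--     i = 0
--     n = len(query)
--     while i < n:
--         if query.startswith("%(", i):
--             j = query.find(")s", i + 2)
--             if j != -1 and query[i + 2:j] in placeholder:
--                 out.append(placeholder[query[i + 2:j]])
--                 i = j + 2
--                 continue
--         out.append(query[i])
--         i += 1
--     return "".join(out), [list(item.values()) for item in params]
-- ===== Notes on version B (the rewrite author's own statement) =====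
-- stated objective: alternative
-- what changed: B replaces A's sequence of global str.replace passes (one whole-query rewrite per key of the first row) by a single left-to-right tokenizing scan of the query that parses each '%(name)s' placeholder once and substitutes via a key-to-'$i' dictionary built from the first row; values are collected in one uniform pass over all rows.
-- outside the precondition, e.g. on pyformat_in_list_to_native('v %(a)s)s', [{'a)s': 1}]): A returns ('v $1', [[1]]), B returns ('v %(a)s)s', [[1]]); on pyformat_in_list_to_native('%(a%(b)s', [{'b': 1, 'a%(b': 2}]): A returns ('%(a$1', [[1, 2]]), B returns ('$2', [[1, 2]])
import Mathlib
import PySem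

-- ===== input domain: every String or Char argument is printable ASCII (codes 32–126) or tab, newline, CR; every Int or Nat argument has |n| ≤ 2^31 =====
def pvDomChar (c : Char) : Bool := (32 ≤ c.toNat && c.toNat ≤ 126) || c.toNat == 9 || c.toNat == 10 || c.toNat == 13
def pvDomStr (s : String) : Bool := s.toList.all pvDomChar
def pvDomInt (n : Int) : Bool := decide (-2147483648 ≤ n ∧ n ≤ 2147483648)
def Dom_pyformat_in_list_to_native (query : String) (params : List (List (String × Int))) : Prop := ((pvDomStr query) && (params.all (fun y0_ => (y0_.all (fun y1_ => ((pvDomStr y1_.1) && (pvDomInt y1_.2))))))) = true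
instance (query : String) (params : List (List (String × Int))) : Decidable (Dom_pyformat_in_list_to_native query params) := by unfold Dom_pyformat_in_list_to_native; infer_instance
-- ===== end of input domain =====

-- B rewrites the query by a single tokenizing scan (parse each '%(name)s' once, substitute via a
-- first-row key -> "$i" dictionary) instead of A's one global str.replace pass per key; values are
-- collected in one uniform pass. Objective: alternative (single-scan algorithm, same observable result on Pre_).


-- ===== PORT A =====
-- A: copy params, pop the first item, interleave placeholder replacement with
-- collecting its values while incrementing a counter, then a second loop collects
-- values of the remaining items.
def pyformat_in_list_to_native (query : String) (params : List (List (String × Int))) : String × List (List Int) :=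
  match params with
  | [] => (query, [])  -- unreachable under Pre_: data.pop(0) raises IndexError
  | firstDataItem :: data =>
    let st := firstDataItem.foldl
      (fun (st : String × List Int × Int) kv =>
        (PySem.Str.replace st.1 (String.join ["%(", kv.1, ")s"]) ("$" ++ PySem.Int.toStr st.2.2),
         st.2.1 ++ [kv.2], st.2.2 + 1))
      (query, ([], 1))
    let fieldValues := data.foldl
      (fun acc item => acc ++ [item.foldl (fun fvs kv => fvs ++ [kv.2]) []])
      [st.2.1]
    (st.1, fieldValues)

-- ===== PORT B =====
-- B-side helper: query.find(")s", i) relative to a suffix — splits cs at the first ")s";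
-- returns (chars before it, chars after it), none if absent.
def pvFindRS : List Char → Option (List Char × List Char)
  | [] => none
  | [_] => none
  | a :: b :: rest =>
    if a = ')' ∧ b = 's' then some ([], rest)
    else
      match pvFindRS (b :: rest) with
      | none => none
      | some (p, q) => some (a :: p, q)
termination_by l => l.length

-- cited by pvScan's decreasing_by: the split accounts for name, ')', 's' and the remainder
-- cited by pvScan's decreasing_by and the proofs: the split accounts for name, ')', 's', remainder
theorem pvFindRS_sound : ∀ {cs name after : List Char}, pvFindRS cs = some (name, after) →
    cs = name ++ ')' :: 's' :: after := by
  intro cs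
  induction cs using pvFindRS.induct with
  | case1 => intro name after h; simp [pvFindRS] at h
  | case2 c => intro name after h; simp [pvFindRS] at h
  | case3 a b rest hab =>
    intro name after h
    rw [pvFindRS.eq_def] at h
    dsimp only at h
    rw [if_pos hab] at h
    obtain ⟨rfl, rfl⟩ : name = [] ∧ rest = after := by simpa using h
    simp [hab.1, hab.2]
  | case4 a b rest hab hnone ih =>
    intro name after h
    rw [pvFindRS.eq_def] at h
    dsimp only at h
    rw [if_neg hab, hnone] at h
    simp at h
  | case5 a b rest hab p q hsome ih =>
    intro name after h
    rw [pvFindRS.eq_def] at h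
    dsimp only at h
    rw [if_neg hab, hsome] at h
    simp only [Option.some.injEq, Prod.mk.injEq] at h
    obtain ⟨rfl, rfl⟩ : a :: p = name ∧ q = after := ⟨h.1, h.2⟩
    have := ih hsome
    rw [this]
    simp


-- B's while loop over the query: emit chars; at "%(", try to parse "name)s" and look the name up.
def pvScan (pos : PySem.Dict String String) : List Char → List Char
  | [] => []
  | [c] => [c]
  | c :: d :: rest =>
    if c = '%' ∧ d = '(' then
      match h : pvFindRS rest with
      | some (name, after) =>
        match pos.get? (String.ofList name) with
        | some rep => rep.toList ++ pvScan pos after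
        | none => c :: pvScan pos (d :: rest)
      | none => c :: pvScan pos (d :: rest)
    else c :: pvScan pos (d :: rest)
termination_by l => l.length
decreasing_by
  · have := pvFindRS_sound h; subst this; simp; omega
  · simp
  · simp
  · simp

-- B: build the key -> "$i" placeholder dict from the first row, scan the query once,
-- collect values uniformly for every row.
def pyformat_in_list_to_native_alt (query : String) (params : List (List (String × Int))) : String × List (List Int) :=
  match params with
  | [] => (query, [])  -- unreachable under Pre_: params[0] raises IndexError
  | first :: _ =>
    let placeholder := (PySem.List.enumerate first 1).foldl
      (fun (d : PySem.Dict String String) p => d.insert p.2.1 ("$" ++ PySem.Int.toStr p.1))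
      PySem.Dict.empty
    (String.ofList (pvScan placeholder query.toList),
     params.map (fun item => item.map Prod.snd))

-- ===== PRECONDITION & SPEC =====
-- Pre_ excludes: empty params (A and B both raise IndexError); and, only when the query contains
-- "%(" at all (otherwise neither program rewrites anything), first-row field names containing
-- "%(", ")s" or "$" (they make the pyformat placeholder grammar ambiguous, so A's sequential
-- global-replace semantics and B's single-scan semantics legitimately diverge on such names)
-- and duplicate first-row keys (an association list with duplicate keys represents no Python dict).
def Pre_pyformat_in_list_to_native (query : String) (params : List (List (String × Int))) : Prop :=
  params ≠ [] ∧
  (PySem.Str.isIn "%(" query = false ∨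
    (((params.headD []).map Prod.fst).Nodup ∧
     ∀ kv ∈ params.headD [], PySem.Str.isIn "%(" kv.1 = false ∧
       PySem.Str.isIn ")s" kv.1 = false ∧ PySem.Str.isIn "$" kv.1 = false))
instance (query : String) (params : List (List (String × Int))) : Decidable (Pre_pyformat_in_list_to_native query params) := by unfold Pre_pyformat_in_list_to_native; infer_instance

def pvWitness_pyformat_in_list_to_native : String × (List (List (String × Int))) :=
  ("INSERT INTO t (a, b) VALUES (%(a)s, %(b)s)", [[("a", 1), ("b", 2)], [("a", 3), ("b", 4)]])

def Spec_pyformat_in_list_to_native (query : String) (params : List (List (String × Int))) (out : String × List (List Int)) : Prop := out = pyformat_in_list_to_native_alt query params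
instance (query : String) (params : List (List (String × Int))) (out : String × List (List Int)) : Decidable (Spec_pyformat_in_list_to_native query params out) := by unfold Spec_pyformat_in_list_to_native; infer_instance

-- ===== CLAIM (what is proved, stated in full; the proofs are below) =====
def Claim_equal_pyformat_in_list_to_native : Prop := ∀ (query : String) (params : List (List (String × Int))), Dom_pyformat_in_list_to_native query params → Pre_pyformat_in_list_to_native query params → Spec_pyformat_in_list_to_native query params (pyformat_in_list_to_native query params)

-- ===== LEMMAS AND PROOFS =====



def pvRepl (old new : List Char) : List Char → List Char
  | [] => []
  | c :: t =>
    if old.isPrefixOf (c :: t) ∧ old ≠ [] then new ++ pvRepl old new (t.drop (old.length - 1))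
    else c :: pvRepl old new t
termination_by l => l.length
decreasing_by
  all_goals simp

theorem pvRepl_nil (old new : List Char) : pvRepl old new [] = [] := by rw [pvRepl.eq_def]

theorem pvRepl_neg (old new : List Char) (c : Char) (t : List Char) (h : ¬ old <+: (c :: t)) :
    pvRepl old new (c :: t) = c :: pvRepl old new t := by
  rw [pvRepl.eq_def]
  dsimp only
  rw [if_neg]
  rintro ⟨h1, -⟩
  exact h (List.isPrefixOf_iff_prefix.mp h1)

theorem pvRepl_pos (old new : List Char) (s : List Char) (hold : old ≠ []) (h : old <+: s) :
    pvRepl old new s = new ++ pvRepl old new (s.drop old.length) := by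
  match s with
  | [] =>
    have : old = [] := List.prefix_nil.mp h
    exact absurd this hold
  | c :: t =>
    rw [pvRepl.eq_def]
    dsimp only
    rw [if_pos ⟨List.isPrefixOf_iff_prefix.mpr h, hold⟩]
    congr 1
    match old with
    | o :: old' => simp

theorem pvGo_eq (old new : List Char) (hold : old ≠ []) : ∀ (fuel : Nat) (l acc : List Char), l.length ≤ fuel →
    PySem.Chars.replace.go old new fuel l acc = acc.reverse ++ pvRepl old new l := by
  intro fuel
  induction fuel with
  | zero => intro l acc h; have : l = [] := by cases l <;> simp_all
            subst this; simp [PySem.Chars.replace.go, pvRepl_nil]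
  | succ f ih =>
    intro l acc h
    match l with
    | [] => simp [PySem.Chars.replace.go, pvRepl_nil]
    | c :: t =>
      rw [PySem.Chars.replace.go]
      by_cases hp : old.isPrefixOf (c :: t)
      · rw [if_pos hp]
        rw [ih _ _ (by have h1 : 1 ≤ old.length := List.length_pos_iff.mpr hold; simp at h ⊢; omega)]
        rw [pvRepl_pos old new _ hold (List.isPrefixOf_iff_prefix.mp hp)]
        simp
      · rw [if_neg hp]
        rw [ih _ _ (by simp at h; omega)]
        rw [pvRepl_neg old new c t (fun hh => hp (List.isPrefixOf_iff_prefix.mpr hh))]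
        simp

theorem pvReplace_eq (old new s : List Char) (hold : old ≠ []) :
    PySem.Chars.replace s old new = pvRepl old new s := by
  unfold PySem.Chars.replace
  rw [if_neg (by simpa using hold)]
  simpa using pvGo_eq old new hold s.length s [] le_rfl

-- the placeholder pattern "%(k)s"
def pvPat (k : List Char) : List Char := '%' :: '(' :: (k ++ [')', 's'])

theorem pvPC_prefix_iff (y : List Char) : ['%','('] <+: y ↔ y[0]? = some '%' ∧ y[1]? = some '(' := by
  match y with
  | [] => simp
  | [c] => simp [List.cons_prefix_cons, eq_comm]
  | c :: d :: t => simp [List.cons_prefix_cons, eq_comm]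

theorem pvPat_starts (k y : List Char) (h : pvPat k <+: y) : ['%','('] <+: y := by
  refine List.IsPrefix.trans ?_ h
  exact ⟨k ++ [')', 's'], rfl⟩

theorem pvParse_unique : ∀ (k₂ k₁ u : List Char), ¬ [')','s'] <:+: k₁ → ¬ [')','s'] <:+: k₂ →
    (k₂ ++ [')','s']) <+: (k₁ ++ [')','s'] ++ u) → k₂ = k₁ := by
  intro k₂
  induction k₂ with
  | nil =>
    intro k₁ u h1 h2 hp
    match k₁ with
    | [] => rfl
    | [x] =>
      rw [List.nil_append] at hp
      obtain ⟨rfl, hq⟩ := (List.cons_prefix_cons).mp hp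
      obtain ⟨h's, -⟩ := (List.cons_prefix_cons).mp hq
      exact absurd h's (by decide)
    | x :: y :: k₁' =>
      rw [List.nil_append] at hp
      obtain ⟨rfl, hq⟩ := (List.cons_prefix_cons).mp hp
      obtain ⟨rfl, -⟩ := (List.cons_prefix_cons).mp hq
      exact absurd ⟨[], k₁', rfl⟩ h1
  | cons a k₂' ih =>
    intro k₁ u h1 h2 hp
    match k₁ with
    | [] =>
      rw [List.nil_append] at hp
      obtain ⟨rfl, hq⟩ := (List.cons_prefix_cons).mp hp
      match k₂' with
      | [] =>
        obtain ⟨h', -⟩ := (List.cons_prefix_cons).mp hq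
        exact absurd h' (by decide)
      | b :: k₂'' =>
        simp only [List.append_eq, List.cons_append] at hq
        obtain ⟨rfl, -⟩ := (List.cons_prefix_cons).mp hq
        exact absurd ⟨[], k₂'', rfl⟩ h2
    | x :: k₁' =>
      simp only [List.cons_append, List.append_assoc] at hp
      obtain ⟨rfl, hq⟩ := (List.cons_prefix_cons).mp hp
      have hra : k₂' ++ [')', 's'] <+: k₁' ++ [')', 's'] ++ u := by
        rw [List.append_assoc]; exact hq
      have h1' : ¬ [')','s'] <:+: k₁' := fun ⟨s', t', he⟩ => h1 ⟨a :: s', t', by rw [← he]; rfl⟩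
      have h2' : ¬ [')','s'] <:+: k₂' := fun ⟨s', t', he⟩ => h2 ⟨a :: s', t', by rw [← he]; rfl⟩
      rw [ih k₁' u h1' h2' hra]

theorem pvPat_ne_nil (k : List Char) : pvPat k ≠ [] := by simp [pvPat]

theorem pvRepl_exact (old new x : List Char) (hold : old ≠ []) :
    pvRepl old new (old ++ x) = new ++ pvRepl old new x := by
  rw [pvRepl_pos old new _ hold (List.prefix_append old x)]
  rw [List.drop_left]

-- a prefix block that contains no start of a "%(…" pattern passes through pvRepl unchanged
theorem pvRepl_pass (k' new : List Char) : ∀ (a b : List Char),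
    (¬ pvPat k' <+: (a ++ b)) →
    (∀ t, 1 ≤ t → t < a.length → ¬ ((a ++ b)[t]? = some '%' ∧ (a ++ b)[t+1]? = some '(')) →
    pvRepl (pvPat k') new (a ++ b) = a ++ pvRepl (pvPat k') new b := by
  intro a
  induction a with
  | nil => intro b _ _; simp
  | cons c a' ih =>
    intro b h0 hin
    rw [List.cons_append, pvRepl_neg _ _ _ _ (by rw [← List.cons_append]; exact h0)]
    match a' with
    | [] => rfl
    | e :: a'' =>
      rw [ih b ?h0' ?hin']
      · simp
      case h0' =>
        intro hpre
        have hpc := pvPat_starts _ _ hpre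
        rw [pvPC_prefix_iff] at hpc
        exact hin 1 le_rfl (by simp) (by simpa using hpc)
      case hin' =>
        intro t h1 h2 ⟨hp, hq⟩
        refine hin (t+1) (by omega) (by simp at h2 ⊢; omega) ⟨?_, ?_⟩
        · rw [List.cons_append, List.getElem?_cons_succ]; exact hp
        · rw [List.cons_append, List.getElem?_cons_succ]; exact hq

-- every char of Nat.toDigits 10 is a decimal digit
theorem pvToDigitsCore_digit : ∀ (fuel n : Nat) (acc : List Char),
    (∀ c ∈ acc, c.isDigit) → ∀ c ∈ Nat.toDigitsCore 10 fuel n acc, c.isDigit := by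
  intro fuel
  induction fuel with
  | zero => intro n acc hacc; simpa [Nat.toDigitsCore] using hacc
  | succ f ih =>
    intro n acc hacc c hc
    rw [Nat.toDigitsCore] at hc
    have hd : (Nat.digitChar (n % 10)).isDigit := by
      have : n % 10 < 10 := Nat.mod_lt _ (by omega)
      interval_cases h : n % 10 <;> decide
    by_cases h10 : n / 10 = 0
    · rw [if_pos h10] at hc
      rcases List.mem_cons.mp hc with hc1 | hc1
      · exact hc1 ▸ hd
      · exact hacc c hc1
    · rw [if_neg h10] at hc
      refine ih (n / 10) _ ?_ c hc
      intro c' hc'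
      rcases List.mem_cons.mp hc' with h | h
      · exact h ▸ hd
      · exact hacc c' h

theorem pvToChars_digit (i : Int) (hi : 0 ≤ i) : ∀ c ∈ PySem.Int.toChars i, c.isDigit := by
  unfold PySem.Int.toChars
  rw [if_neg (by omega)]
  exact pvToDigitsCore_digit _ _ [] (by simp)

theorem pvPat_no_inner (k b : List Char) (hk : ¬ ['%','('] <:+: k) :
    ∀ t, 1 ≤ t → t < (pvPat k).length →
      ¬ ((pvPat k ++ b)[t]? = some '%' ∧ (pvPat k ++ b)[t+1]? = some '(') := by
  have hshape : pvPat k ++ b = '%' :: '(' :: (k ++ ([')','s'] ++ b)) := by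
    simp [pvPat]
  have hlen : (pvPat k).length = k.length + 4 := by simp [pvPat]
  intro t h1 h2 ⟨hp, hq⟩
  match t, h1 with
  | 1, _ =>
    rw [hshape] at hp
    simp at hp
  | (n+2), _ =>
    rw [hshape] at hp hq
    rw [List.getElem?_cons_succ, List.getElem?_cons_succ] at hp hq
    by_cases hn : n < k.length
    · rw [List.getElem?_append_left hn] at hp
      by_cases hn1 : n + 1 < k.length
      · rw [List.getElem?_append_left hn1] at hq
        apply hk
        have hpre : ['%','('] <+: k.drop n := by
          rw [pvPC_prefix_iff]
          constructor
          · rw [List.getElem?_drop]; simpa using hp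
          · rw [List.getElem?_drop]; simpa using hq
        exact hpre.isInfix.trans (List.drop_suffix n k).isInfix
      · have hn1' : n + 1 = k.length := by omega
        rw [List.getElem?_append_right (by omega)] at hq
        rw [hn1'] at hq
        simp at hq
    · rw [List.getElem?_append_right (by omega)] at hp
      have : n - k.length < 2 := by rw [hlen] at h2; omega
      interval_cases h : n - k.length <;> simp_all

theorem pvPat_prefix_pat (k₂ k b : List Char) (hk_s : ¬ [')','s'] <:+: k) (hk2_s : ¬ [')','s'] <:+: k₂)
    (h : pvPat k₂ <+: pvPat k ++ b) : k₂ = k := by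
  have hshape : pvPat k ++ b = '%' :: '(' :: (k ++ [')','s'] ++ b) := by simp [pvPat]
  rw [hshape] at h
  unfold pvPat at h
  obtain ⟨-, h⟩ := (List.cons_prefix_cons).mp h
  obtain ⟨-, h⟩ := (List.cons_prefix_cons).mp h
  exact pvParse_unique k₂ k b hk_s hk2_s h

theorem pvRepl_pass_pat (k k₂ new b : List Char) (hk_pc : ¬ ['%','('] <:+: k)
    (hk_s : ¬ [')','s'] <:+: k) (hk2_s : ¬ [')','s'] <:+: k₂) (hne : k₂ ≠ k) :
    pvRepl (pvPat k₂) new (pvPat k ++ b) = pvPat k ++ pvRepl (pvPat k₂) new b := by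
  refine pvRepl_pass k₂ new (pvPat k) b ?_ (pvPat_no_inner k b hk_pc)
  intro h
  exact hne (pvPat_prefix_pat k₂ k b hk_s hk2_s h)

theorem pvRepl_pass_rep (i : Int) (hi : 0 ≤ i) (k₂ new b : List Char) :
    pvRepl (pvPat k₂) new (('$' :: PySem.Int.toChars i) ++ b)
      = ('$' :: PySem.Int.toChars i) ++ pvRepl (pvPat k₂) new b := by
  have hnope : ∀ c ∈ ('$' :: PySem.Int.toChars i), c ≠ '%' := by
    intro c hc
    rcases List.mem_cons.mp hc with h | h
    · subst h; decide
    · have := pvToChars_digit i hi c h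
      intro hcontra; subst hcontra; simp at this
  refine pvRepl_pass k₂ new _ b ?_ ?_
  · intro h
    have hpc := (pvPC_prefix_iff _).mp (pvPat_starts _ _ h)
    obtain ⟨hp, -⟩ := hpc
    simp at hp
  · intro t h1 h2 ⟨hp, hq⟩
    rw [List.getElem?_append_left h2] at hp
    exact hnope '%' (List.mem_of_getElem? hp) rfl

def pvF (ps : List (Int × List Char)) (s : List Char) : List Char :=
  ps.foldl (fun s p => pvRepl (pvPat p.2) ('$' :: PySem.Int.toChars p.1) s) s

theorem pvF_nil (ps : List (Int × List Char)) : pvF ps [] = [] := by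
  induction ps with
  | nil => rfl
  | cons p l ih => show pvF l (pvRepl _ _ []) = []; rw [pvRepl_nil]; exact ih

theorem pvF_cons (p : Int × List Char) (l : List (Int × List Char)) (s : List Char) :
    pvF (p :: l) s = pvF l (pvRepl (pvPat p.2) ('$' :: PySem.Int.toChars p.1) s) := rfl

def pvClean (k : List Char) : Prop := ¬ ['%','('] <:+: k ∧ ¬ [')','s'] <:+: k ∧ '$' ∉ k

theorem pvF_pass_pat (l : List (Int × List Char)) (k : List Char)
    (hk_pc : ¬ ['%','('] <:+: k) (hk_s : ¬ [')','s'] <:+: k)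
    (h : ∀ q ∈ l, ¬ [')','s'] <:+: q.2 ∧ q.2 ≠ k) :
    ∀ x, pvF l (pvPat k ++ x) = pvPat k ++ pvF l x := by
  induction l with
  | nil => intro x; rfl
  | cons q l' ih =>
    intro x
    rw [pvF_cons, pvRepl_pass_pat k q.2 _ x hk_pc hk_s (h q (by simp)).1 (h q (by simp)).2]
    rw [ih (fun q' hq' => h q' (by simp [hq'])) _, pvF_cons]

theorem pvF_pass_rep (l : List (Int × List Char)) (i : Int) (hi : 0 ≤ i) :
    ∀ y, pvF l (('$' :: PySem.Int.toChars i) ++ y) = ('$' :: PySem.Int.toChars i) ++ pvF l y := by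
  induction l with
  | nil => intro y; rfl
  | cons q l' ih =>
    intro y
    rw [pvF_cons, pvRepl_pass_rep i hi q.2 _ y, ih, pvF_cons]

theorem pvF_split (ps₁ ps₂ : List (Int × List Char)) (i : Int) (k : List Char)
    (hclean : ∀ p ∈ ps₁ ++ (i,k) :: ps₂, pvClean p.2) (hi : 0 ≤ i)
    (hnodup : ((ps₁ ++ (i,k) :: ps₂).map Prod.snd).Nodup) (u : List Char) :
    pvF (ps₁ ++ (i,k) :: ps₂) (pvPat k ++ u)
      = ('$' :: PySem.Int.toChars i) ++ pvF (ps₁ ++ (i,k) :: ps₂) u := by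
  have hkc : pvClean k := hclean (i,k) (by simp)
  have hknotin : k ∉ ps₁.map Prod.snd := by
    rw [List.map_append] at hnodup
    intro hmem
    exact (List.disjoint_of_nodup_append hnodup) hmem (by simp)
  have hps₁ : ∀ q ∈ ps₁, ¬ [')','s'] <:+: q.2 ∧ q.2 ≠ k := by
    intro q hq
    refine ⟨(hclean q (by simp [hq])).2.1, ?_⟩
    intro he; exact hknotin (he ▸ List.mem_map_of_mem hq)
  have hfold : ∀ s, pvF (ps₁ ++ (i,k) :: ps₂) s
      = pvF ps₂ (pvRepl (pvPat k) ('$' :: PySem.Int.toChars i) (pvF ps₁ s)) := by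
    intro s; simp [pvF, List.foldl_append]
  rw [hfold, hfold u]
  rw [pvF_pass_pat ps₁ k hkc.1 hkc.2.1 hps₁]
  rw [pvRepl_exact _ _ _ (pvPat_ne_nil k)]
  rw [pvF_pass_rep ps₂ i hi]

theorem pvRepl_prefix_no_dollar (old ds : List Char) :
    ∀ u (w : List Char), '$' ∉ w → w <+: pvRepl old ('$' :: ds) u → w <+: u := by
  intro u
  induction u using pvRepl.induct old with
  | case1 => intro w hw; rw [pvRepl_nil]; exact id
  | case2 c t hmatch ih =>
    intro w hw h
    rw [pvRepl.eq_def] at h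
    dsimp only at h
    rw [if_pos hmatch] at h
    match w, h with
    | [], _ => exact List.nil_prefix
    | x :: w', h =>
      obtain ⟨rfl, -⟩ := (List.cons_prefix_cons).mp h
      exact absurd (List.mem_cons_self) hw
  | case3 c t hmatch ih =>
    intro w hw h
    rw [pvRepl.eq_def] at h
    dsimp only at h
    rw [if_neg hmatch] at h
    match w, h with
    | [], _ => exact List.nil_prefix
    | x :: w', h =>
      obtain ⟨rfl, h'⟩ := (List.cons_prefix_cons).mp h
      exact List.cons_prefix_cons.mpr ⟨rfl, ih w' (fun hm => hw (by simp [hm])) h'⟩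


theorem pvF_nomatch (ps : List (Int × List Char)) (c : Char)
    (hdol : ∀ p ∈ ps, '$' ∉ p.2) :
    ∀ (cs : List Char), (∀ p ∈ ps, ¬ pvPat p.2 <+: (c :: cs)) →
    pvF ps (c :: cs) = c :: pvF ps cs := by
  induction ps with
  | nil => intro cs _; rfl
  | cons p l ih =>
    intro cs h
    rw [pvF_cons, pvRepl_neg _ _ _ _ (h p (by simp))]
    rw [ih (fun q hq => hdol q (by simp [hq])) _ ?hnext, pvF_cons]
    case hnext =>
      intro q hq hpre
      unfold pvPat at hpre
      obtain ⟨hc, hpre'⟩ := (List.cons_prefix_cons).mp hpre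
      have hwin : ('(' :: (q.2 ++ [')','s'])) <+: pvRepl (pvPat p.2) ('$' :: PySem.Int.toChars p.1) cs :=
        hpre'
      have hnd : '$' ∉ ('(' :: (q.2 ++ [')','s'])) := by
        intro hm
        rcases List.mem_cons.mp hm with h' | h'
        · exact absurd h' (by decide)
        · rcases List.mem_append.mp h' with h'' | h''
          · exact hdol q (by simp [hq]) h''
          · simp at h''
      have := pvRepl_prefix_no_dollar (pvPat p.2) (PySem.Int.toChars p.1) cs _ hnd hwin
      exact h q (by simp [hq]) (List.cons_prefix_cons.mpr ⟨hc, this⟩)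

theorem pvFindRS_clean : ∀ (k after : List Char), ¬ [')','s'] <:+: k →
    pvFindRS (k ++ ')' :: 's' :: after) = some (k, after) := by
  intro k
  induction k with
  | nil =>
    intro after _
    rw [List.nil_append, pvFindRS.eq_def]
    dsimp only
    rw [if_pos ⟨rfl, rfl⟩]
  | cons c k' ih =>
    intro after hk
    match k' with
    | [] =>
      have hx : pvFindRS (')' :: 's' :: after) = some ([], after) := by
        rw [pvFindRS.eq_def]
        dsimp only
        rw [if_pos ⟨rfl, rfl⟩]
      rw [List.cons_append, List.nil_append, pvFindRS.eq_def]
      dsimp only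
      rw [if_neg (by rintro ⟨-, h⟩; exact absurd h (by decide)), hx]
    | d :: k'' =>
      have hx := ih after (fun ⟨s', t', he⟩ => hk ⟨c :: s', t', by rw [← he]; rfl⟩)
      simp only [List.cons_append] at hx ⊢
      rw [pvFindRS.eq_def]
      dsimp only
      rw [if_neg (by rintro ⟨rfl, rfl⟩; exact hk ⟨[], k'', rfl⟩), hx]

theorem pvToStr_toList (i : Int) : ("$" ++ PySem.Int.toStr i).toList = '$' :: PySem.Int.toChars i := by
  rw [String.toList_append]
  rw [show PySem.Int.toStr i = String.ofList (PySem.Int.toChars i) from rfl]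
  simp

theorem pvMain (ps : List (Int × List Char)) (pos : PySem.Dict String String)
    (hclean : ∀ p ∈ ps, pvClean p.2) (hge : ∀ p ∈ ps, 1 ≤ p.1)
    (hnodup : (ps.map Prod.snd).Nodup)
    (hpos : ∀ p ∈ ps, pos.get? (String.ofList p.2) = some ("$" ++ PySem.Int.toStr p.1))
    (hpos2 : ∀ nm : List Char, (∀ p ∈ ps, p.2 ≠ nm) → pos.get? (String.ofList nm) = none) :
    ∀ (s : List Char), pvF ps s = pvScan pos s := by
  have hdol : ∀ p ∈ ps, '$' ∉ p.2 := fun p hp => (hclean p hp).2.2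
  have main : ∀ (n : Nat) (s : List Char), s.length ≤ n → pvF ps s = pvScan pos s := by
    intro n
    induction n using Nat.strong_induction_on with
    | _ n ih =>
      intro s hlen
      by_cases hm : ∃ p ∈ ps, pvPat p.2 <+: s
      · obtain ⟨⟨i, k⟩, hp, hpre⟩ := hm
        obtain ⟨u, hu⟩ := hpre
        obtain ⟨ps₁, ps₂, hps⟩ := List.append_of_mem hp
        have hkc : pvClean k := hclean (i, k) hp
        have hulen : u.length < n := by
          have := congrArg List.length hu
          simp [pvPat] at this
          omega
        have hrec : pvF ps u = pvScan pos u := ih u.length (by omega) u le_rfl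
        have hscan : pvScan pos (pvPat k ++ u) = ('$' :: PySem.Int.toChars i) ++ pvScan pos u := by
          have hsh : pvPat k ++ u = '%' :: '(' :: (k ++ ')' :: 's' :: u) := by simp [pvPat]
          rw [hsh, pvScan.eq_def]
          dsimp only
          rw [if_pos ⟨rfl, rfl⟩]
          rw [pvFindRS_clean k u hkc.2.1]
          dsimp only
          rw [hpos (i, k) hp]
          dsimp only
          rw [pvToStr_toList]
        rw [← hu, hscan, ← hrec]
        rw [hps]
        exact pvF_split ps₁ ps₂ i k (hps ▸ hclean) (le_trans (by omega) (hge (i, k) hp))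
          (hps ▸ hnodup) u
      · replace hm : ∀ p ∈ ps, ¬ pvPat p.2 <+: s := fun p hp hpre => hm ⟨p, hp, hpre⟩
        match s with
        | [] => rw [pvF_nil, pvScan.eq_def]
        | [c] =>
          rw [pvF_nomatch ps c hdol [] (fun p hp => hm p hp), pvF_nil, pvScan.eq_def]
        | c :: d :: rest =>
          rw [pvF_nomatch ps c hdol (d :: rest) (fun p hp => hm p hp)]
          have hrec : pvF ps (d :: rest) = pvScan pos (d :: rest) :=
            ih (d :: rest).length (by simp at hlen ⊢; omega) _ le_rfl
          rw [hrec]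
          conv_rhs => rw [pvScan.eq_def]
          dsimp only
          by_cases hcd : c = '%' ∧ d = '('
          · rw [if_pos hcd]
            cases hfr : pvFindRS rest with
            | none => dsimp only
            | some pq =>
              obtain ⟨name, after⟩ := pq
              dsimp only
              cases hg : pos.get? (String.ofList name) with
              | none => rfl
              | some rep =>
                exfalso
                by_cases hex : ∀ p ∈ ps, p.2 ≠ name
                · rw [hpos2 name hex] at hg; simp at hg
                · obtain ⟨p, hp2⟩ := not_forall.mp hex
                  obtain ⟨hpmem, hpname'⟩ := Classical.not_imp.mp hp2
                  have hpname := not_not.mp hpname'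
                  apply hm p hpmem
                  have hrest := pvFindRS_sound hfr
                  rw [hpname]
                  unfold pvPat
                  rw [hcd.1, hcd.2]
                  exact ⟨after, by rw [hrest]; simp⟩
          · rw [if_neg hcd]
  intro s
  exact main s.length s le_rfl

-- collecting values by repeated append equals mapping Prod.snd
theorem pv_snd_foldl (l : List (String × Int)) (acc : List Int) :
    l.foldl (fun fvs kv => fvs ++ [kv.2]) acc = acc ++ l.map Prod.snd := by
  induction l generalizing acc with
  | nil => simp [List.foldl]
  | cons h t ih => simp [List.foldl, ih]

-- the outer value-collection loop equals a map
theorem pv_outer_foldl (l : List (List (String × Int))) (acc : List (List Int)) :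
    l.foldl (fun acc item => acc ++ [item.foldl (fun fvs kv => fvs ++ [kv.2]) []]) acc
      = acc ++ l.map (fun item => item.map Prod.snd) := by
  induction l generalizing acc with
  | nil => simp [List.foldl]
  | cons h t ih =>
    simp only [List.foldl]
    rw [ih, pv_snd_foldl]
    simp

-- A's combined first-item loop splits into a query fold over enumerate and the value map
theorem pv_first_fold (l : List (String × Int)) (q : String) (acc : List Int) (c : Int) :
    l.foldl
      (fun (st : String × List Int × Int) kv =>
        (PySem.Str.replace st.1 (String.join ["%(", kv.1, ")s"]) ("$" ++ PySem.Int.toStr st.2.2),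
         st.2.1 ++ [kv.2], st.2.2 + 1))
      (q, (acc, c))
    = ((PySem.List.enumerate l c).foldl
        (fun q p => PySem.Str.replace q ("%(" ++ p.2.1 ++ ")s") ("$" ++ PySem.Int.toStr p.1)) q,
       acc ++ l.map Prod.snd, c + l.length) := by
  induction l generalizing q acc c with
  | nil => simp [PySem.List.enumerate_nil, List.foldl]
  | cons h t ih =>
    simp only [List.foldl, PySem.List.enumerate_cons]
    rw [ih]
    have hjoin : String.join ["%(", h.1, ")s"] = "%(" ++ h.1 ++ ")s" := by
      simp [String.join]
    rw [hjoin]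
    simp
    omega

-- the string-level query fold computes pvF on the char level
theorem pv_bridgeA (l : List (Int × (String × Int))) (q : String) :
    (l.foldl (fun q p => PySem.Str.replace q ("%(" ++ p.2.1 ++ ")s") ("$" ++ PySem.Int.toStr p.1)) q).toList
      = pvF (l.map (fun p => (p.1, p.2.1.toList))) q.toList := by
  induction l generalizing q with
  | nil => rfl
  | cons p l' ih =>
    simp only [List.foldl, List.map]
    rw [ih, pvF_cons]
    congr 1
    rw [PySem.Str.toList_replace]
    rw [pvReplace_eq _ _ _ (by simp)]
    congr 1
    · rw [String.toList_append, String.toList_append]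
      show ("%(".toList) ++ p.2.1.toList ++ (")s".toList) = pvPat p.2.1.toList
      rw [show "%(".toList = ['%','('] from rfl, show ")s".toList = [')','s'] from rfl]
      simp [pvPat]
    · exact pvToStr_toList p.1

theorem pv_enum_ge (l : List (String × Int)) : ∀ (c : Int) (p : Int × (String × Int)),
    p ∈ PySem.List.enumerate l c → c ≤ p.1 := by
  induction l with
  | nil => intro c p h; simp [PySem.List.enumerate_nil] at h
  | cons kv t ih =>
    intro c p h
    rw [PySem.List.enumerate_cons] at h
    rcases List.mem_cons.mp h with h' | h'
    · subst h'; rfl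
    · have := ih (c+1) p h'; omega

theorem pv_enum_map_snd_fst (l : List (String × Int)) : ∀ (c : Int),
    (PySem.List.enumerate l c).map (fun p => p.2.1) = l.map Prod.fst := by
  induction l with
  | nil => intro c; rfl
  | cons kv t ih => intro c; rw [PySem.List.enumerate_cons]; simp [ih]

-- the placeholder dict built by B: lookups under distinct first-row keys
theorem pv_pos_items (first : List (String × Int)) (hnd : (first.map Prod.fst).Nodup) :
    ((PySem.List.enumerate first 1).foldl
      (fun (d : PySem.Dict String String) p => d.insert p.2.1 ("$" ++ PySem.Int.toStr p.1))
      PySem.Dict.empty).items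
    = (PySem.List.enumerate first 1).map (fun p => (p.2.1, "$" ++ PySem.Int.toStr p.1)) := by
  rw [PySem.Dict.items_foldl_insert_fresh _ _ _ _ (fun a _ => by simp)
      (by rw [pv_enum_map_snd_fst]; exact hnd)]
  rw [show (PySem.Dict.empty : PySem.Dict String String).items = [] from rfl]
  simp

theorem pv_pos_keys (first : List (String × Int)) (hnd : (first.map Prod.fst).Nodup) :
    ((PySem.List.enumerate first 1).foldl
      (fun (d : PySem.Dict String String) p => d.insert p.2.1 ("$" ++ PySem.Int.toStr p.1))
      PySem.Dict.empty).keys = first.map Prod.fst := by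
  show ((PySem.List.enumerate first 1).foldl _ PySem.Dict.empty).items.map (·.1) = _
  rw [pv_pos_items first hnd, List.map_map]
  exact pv_enum_map_snd_fst first 1

theorem pv_pos_get (first : List (String × Int)) (hnd : (first.map Prod.fst).Nodup) :
    ∀ p ∈ PySem.List.enumerate first 1,
      ((PySem.List.enumerate first 1).foldl
        (fun (d : PySem.Dict String String) p => d.insert p.2.1 ("$" ++ PySem.Int.toStr p.1))
        PySem.Dict.empty).get? p.2.1 = some ("$" ++ PySem.Int.toStr p.1) := by
  intro p hp
  refine PySem.Dict.get?_of_mem_items _ ?_ ?_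
  · rw [pv_pos_items first hnd]
    exact List.mem_map_of_mem hp
  · rw [pv_pos_keys first hnd]; exact hnd

theorem pv_pos_none (first : List (String × Int)) (hnd : (first.map Prod.fst).Nodup)
    (nm : String) (h : nm ∉ first.map Prod.fst) :
    ((PySem.List.enumerate first 1).foldl
      (fun (d : PySem.Dict String String) p => d.insert p.2.1 ("$" ++ PySem.Int.toStr p.1))
      PySem.Dict.empty).get? nm = none := by
  rw [PySem.Dict.get?_eq_none_iff_not_mem_keys, pv_pos_keys first hnd]
  exact h

-- with no "%(" anywhere in the string, both the replace fold and the scan are the identity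
theorem pvRepl_id (k new : List Char) : ∀ (s : List Char), ¬ ['%','('] <:+: s →
    pvRepl (pvPat k) new s = s := by
  intro s
  induction s with
  | nil => intro _; exact pvRepl_nil _ _
  | cons c t ih =>
    intro h
    rw [pvRepl_neg _ _ _ _ (fun hp => h (pvPat_starts _ _ hp).isInfix)]
    rw [ih (fun ⟨s', t', he⟩ => h ⟨c :: s', t', by rw [← he]; rfl⟩)]

theorem pvF_id (ps : List (Int × List Char)) (s : List Char) (h : ¬ ['%','('] <:+: s) :
    pvF ps s = s := by
  induction ps with
  | nil => rfl
  | cons p l ihl => rw [pvF_cons, pvRepl_id p.2 _ s h, ihl]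

theorem pvScan_id (pos : PySem.Dict String String) :
    ∀ (n : Nat) (s : List Char), s.length ≤ n → ¬ ['%','('] <:+: s → pvScan pos s = s := by
  intro n
  induction n with
  | zero =>
    intro s hlen _
    have : s = [] := by cases s <;> simp_all
    subst this
    rw [pvScan.eq_def]
  | succ m ih =>
    intro s hlen h
    match s with
    | [] => rw [pvScan.eq_def]
    | [c] => rw [pvScan.eq_def]
    | c :: d :: rest =>
      conv_lhs => rw [pvScan.eq_def]
      dsimp only
      rw [if_neg (by rintro ⟨rfl, rfl⟩; exact h ⟨[], rest, rfl⟩)]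
      rw [ih (d :: rest) (by simp at hlen ⊢; omega)
        (fun ⟨s', t', he⟩ => h ⟨c :: s', t', by rw [← he]; rfl⟩)]

-- ===== VERDICT (by name: the statement is the Claim_ definition above) =====
theorem pyformat_in_list_to_native_spec : Claim_equal_pyformat_in_list_to_native := by
  intro query params _ hpre
  unfold Spec_pyformat_in_list_to_native
  obtain ⟨hne, hor⟩ := hpre
  match params with
  | [] => exact absurd rfl hne
  | first :: data =>
    rcases hor with hq | ⟨hnd, hkeys⟩
    · -- query contains no "%(": neither program changes the query
      have hnoinf : ¬ ['%','('] <:+: query.toList := by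
        intro hinf
        have : PySem.Str.isIn "%(" query = true := (PySem.Str.isIn_iff_infix _ _).mpr hinf
        rw [hq] at this; exact Bool.noConfusion this
      have hquery : (PySem.List.enumerate first 1).foldl
          (fun q p => PySem.Str.replace q ("%(" ++ p.2.1 ++ ")s") ("$" ++ PySem.Int.toStr p.1)) query
          = query := by
        have htl := pv_bridgeA (PySem.List.enumerate first 1) query
        rw [pvF_id _ _ hnoinf] at htl
        rw [← String.ofList_toList (s := (PySem.List.enumerate first 1).foldl _ query), htl,
          String.ofList_toList]
      simp only [pyformat_in_list_to_native, pyformat_in_list_to_native_alt,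
        pv_first_fold, pv_outer_foldl]
      rw [hquery, pvScan_id _ query.toList.length query.toList le_rfl hnoinf,
        String.ofList_toList]
      simp
    simp only [List.headD_cons] at hnd hkeys
    have hmemfirst : ∀ q ∈ PySem.List.enumerate first 1, q.2 ∈ first := by
      intro q hq
      rw [← PySem.List.map_snd_enumerate first 1]
      exact List.mem_map_of_mem hq
    have htlinj : Function.Injective String.toList := by
      intro a b h
      rw [← String.ofList_toList (s := a), h, String.ofList_toList]
    set ps : List (Int × List Char) :=
      (PySem.List.enumerate first 1).map (fun p => (p.1, p.2.1.toList)) with hps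
    have hcleanPS : ∀ p ∈ ps, pvClean p.2 := by
      intro p hp
      obtain ⟨q, hq, rfl⟩ := List.mem_map.mp hp
      obtain ⟨h1, h2, h3⟩ := hkeys q.2 (hmemfirst q hq)
      dsimp only
      refine ⟨?_, ?_, ?_⟩
      · intro hinf
        have : PySem.Str.isIn "%(" q.2.1 = true := (PySem.Str.isIn_iff_infix _ _).mpr hinf
        rw [h1] at this; exact Bool.noConfusion this
      · intro hinf
        have : PySem.Str.isIn ")s" q.2.1 = true := (PySem.Str.isIn_iff_infix _ _).mpr hinf
        rw [h2] at this; exact Bool.noConfusion this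
      · intro hmem
        obtain ⟨s', t', hst⟩ := List.append_of_mem hmem
        have : PySem.Str.isIn "$" q.2.1 = true :=
          (PySem.Str.isIn_iff_infix _ _).mpr ⟨s', t', by rw [hst]; simp⟩
        rw [h3] at this; exact Bool.noConfusion this
    have hgePS : ∀ p ∈ ps, 1 ≤ p.1 := by
      intro p hp
      obtain ⟨q, hq, rfl⟩ := List.mem_map.mp hp
      exact pv_enum_ge first 1 q hq
    have hnodupPS : (ps.map Prod.snd).Nodup := by
      have h1 : ps.map Prod.snd
          = ((PySem.List.enumerate first 1).map (fun p => p.2.1)).map String.toList := by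
        rw [hps, List.map_map, List.map_map]; rfl
      rw [h1, pv_enum_map_snd_fst]
      exact hnd.map htlinj
    set pos := (PySem.List.enumerate first 1).foldl
      (fun (d : PySem.Dict String String) p => d.insert p.2.1 ("$" ++ PySem.Int.toStr p.1))
      PySem.Dict.empty with hposdef
    have hposPS : ∀ p ∈ ps, pos.get? (String.ofList p.2) = some ("$" ++ PySem.Int.toStr p.1) := by
      intro p hp
      obtain ⟨q, hq, rfl⟩ := List.mem_map.mp hp
      rw [String.ofList_toList]
      exact pv_pos_get first hnd q hq
    have hpos2PS : ∀ nm : List Char, (∀ p ∈ ps, p.2 ≠ nm) → pos.get? (String.ofList nm) = none := by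
      intro nm hall
      refine pv_pos_none first hnd _ ?_
      intro hmem
      obtain ⟨kv, hkv, hkveq⟩ := List.mem_map.mp hmem
      rw [← PySem.List.map_snd_enumerate first 1] at hkv
      obtain ⟨q, hq, hq2⟩ := List.mem_map.mp hkv
      refine hall (q.1, q.2.1.toList) (List.mem_map_of_mem hq) ?_
      show q.2.1.toList = nm
      rw [hq2, hkveq, String.toList_ofList]
    have hmain := pvMain ps pos hcleanPS hgePS hnodupPS hposPS hpos2PS query.toList
    have hquery : (PySem.List.enumerate first 1).foldl
        (fun q p => PySem.Str.replace q ("%(" ++ p.2.1 ++ ")s") ("$" ++ PySem.Int.toStr p.1)) query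
        = String.ofList (pvScan pos query.toList) := by
      apply htlinj
      rw [pv_bridgeA, String.toList_ofList, ← hps, hmain]
    simp only [pyformat_in_list_to_native, pyformat_in_list_to_native_alt,
      pv_first_fold, pv_outer_foldl]
    rw [hquery]
    simp
    rfl
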